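-- pv_equiv track=rewrite | github.com/wtthornton/TappsMCP | packages/docs-mcp/src/docs_mcp/validators/style.py | _content_lines
-- ===== SOURCE A (Python) =====
-- def _content_lines(content: str) -> list[str]:
--     """Split content into lines, filtering out code blocks and frontmatter."""
--     lines = content.split("\n")
--     result: list[str] = []
--     in_code_block = False
--     in_frontmatter = False
--
--     for i, line in enumerate(lines):
--         # Frontmatter detection (only at start)
--         if i == 0 and line.strip() == "---":
--             in_frontmatter = True
--             result.append("")
--             continue
--         if in_frontmatter:
--             if line.strip() == "---":
--                 in_frontmatter = False
--             result.append("")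
--             continue
--
--         # Code block detection
--         if line.strip().startswith("```"):
--             in_code_block = not in_code_block
--             result.append("")
--             continue
--         if in_code_block:
--             result.append("")
--             continue
--
--         result.append(line)
--
--     return result
-- ===== SOURCE B (Python) =====
-- def _content_lines(content: str) -> list[str]:
--     lines = content.split("\n")
--     k = 0
--     if lines and lines[0].strip() == "---":
--         k = 1
--         while k < len(lines) and lines[k].strip() != "---":
--             k += 1
--         if k < len(lines):
--             k += 1  # the closing '---' is blanked too
--     result = [""] * k
--     in_code_block = False
--     for line in lines[k:]:
--         if line.strip().startswith("```"):
--             in_code_block = not in_code_block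
--             result.append("")
--         elif in_code_block:
--             result.append("")
--         else:
--             result.append(line)
--     return result
-- ===== Notes on version B (the rewrite author's own statement) =====
-- stated objective: alternative
-- what changed: B splits the work into two explicit phases - first compute the length of the frontmatter prefix (including its closing '---', or the whole file if unclosed) and emit that many blanks at once, then run an independent code-fence toggling pass over the remaining lines - instead of A's single loop interleaving the frontmatter and code-block flags with an index check.
import Mathlib
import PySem

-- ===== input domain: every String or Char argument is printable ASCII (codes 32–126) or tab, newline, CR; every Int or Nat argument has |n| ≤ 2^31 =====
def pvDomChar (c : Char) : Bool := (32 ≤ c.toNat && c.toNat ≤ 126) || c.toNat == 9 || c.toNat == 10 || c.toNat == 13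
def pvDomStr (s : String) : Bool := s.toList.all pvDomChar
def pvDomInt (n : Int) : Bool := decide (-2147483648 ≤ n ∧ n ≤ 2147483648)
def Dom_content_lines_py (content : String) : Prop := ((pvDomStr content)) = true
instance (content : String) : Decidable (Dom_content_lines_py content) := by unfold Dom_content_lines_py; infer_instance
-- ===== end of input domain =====

-- B is an alternative decomposition (two explicit phases: frontmatter prefix, then code-fence pass)
-- of A's single two-flag loop; same cost, equal return value on all inputs.

-- ===== PORT A =====
-- A's single loop over enumerate(lines) with flags in_code_block / in_frontmatter;
-- the index i is only compared with 0, carried here as a Nat.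
def pvGoA : List String → Nat → Bool → Bool → List String
  | [], _, _, _ => []
  | line :: rest, i, inCode, inFront =>
    if i = 0 ∧ PySem.Str.strip line = "---" then
      "" :: pvGoA rest (i + 1) inCode true
    else if inFront then
      if PySem.Str.strip line = "---" then "" :: pvGoA rest (i + 1) inCode false
      else "" :: pvGoA rest (i + 1) inCode true
    else if PySem.Str.startswith (PySem.Str.strip line) "```" then
      "" :: pvGoA rest (i + 1) (!inCode) inFront
    else if inCode then "" :: pvGoA rest (i + 1) inCode inFront
    else line :: pvGoA rest (i + 1) inCode inFront

def content_lines_py (content : String) : List String :=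
  pvGoA ((PySem.Chars.splitOn content.toList "\n".toList).map String.ofList) 0 false false

-- ===== PORT B =====
-- phase 1 helper: length of the frontmatter body after the opening '---'
-- (lines up to and including the first '---', or all lines if unclosed)
def pvFmLen : List String → Nat
  | [] => 0
  | line :: rest => if PySem.Str.strip line = "---" then 1 else 1 + pvFmLen rest

-- phase 2: independent code-fence toggling pass
def pvGoB : List String → Bool → List String
  | [], _ => []
  | line :: rest, inCode =>
    if PySem.Str.startswith (PySem.Str.strip line) "```" then "" :: pvGoB rest (!inCode)
    else if inCode then "" :: pvGoB rest inCode
    else line :: pvGoB rest inCode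

def content_lines_py_alt (content : String) : List String :=
  match (PySem.Chars.splitOn content.toList "\n".toList).map String.ofList with
  | [] => []
  | line0 :: rest =>
    if PySem.Str.strip line0 = "---" then
      List.replicate (1 + pvFmLen rest) "" ++ pvGoB (rest.drop (pvFmLen rest)) false
    else pvGoB (line0 :: rest) false

-- ===== PRECONDITION & SPEC =====
def Spec_content_lines_py (content : String) (out : List String) : Prop := out = content_lines_py_alt content
instance (content : String) (out : List String) : Decidable (Spec_content_lines_py content out) := by unfold Spec_content_lines_py; infer_instance

-- ===== CLAIM (what is proved, stated in full; the proofs are below) =====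
def Claim_equal_content_lines_py : Prop := ∀ (content : String), Dom_content_lines_py content → Spec_content_lines_py content (content_lines_py content)

-- ===== LEMMAS AND PROOFS =====
-- Out of frontmatter and past index 0, A's loop is exactly B's code-fence pass.
theorem pvGoA_eq_goB (rest : List String) : ∀ (i : Nat) (c : Bool),
    pvGoA rest (i + 1) c false = pvGoB rest c := by
  induction rest with
  | nil => intro i c; rfl
  | cons line rest ih =>
    intro i c
    simp only [pvGoA, pvGoB, Nat.succ_ne_zero, false_and, if_false]
    split_ifs <;> simp_all [ih (i + 1)]

-- Inside frontmatter, A blanks lines up to and including the first '---'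
-- (or all of them), then continues as the code-fence pass.
theorem pvGoA_front (rest : List String) : ∀ (i : Nat) (c : Bool),
    pvGoA rest (i + 1) c true =
      List.replicate (pvFmLen rest) "" ++ pvGoB (rest.drop (pvFmLen rest)) c := by
  induction rest with
  | nil => intro i c; rfl
  | cons line rest ih =>
    intro i c
    simp only [pvGoA, pvFmLen, Nat.succ_ne_zero, false_and, if_false]
    by_cases h : PySem.Str.strip line = "---"
    · simp [h, pvGoA_eq_goB]
    · simp only [if_neg h, ih (i + 1)]
      rw [show 1 + pvFmLen rest = pvFmLen rest + 1 by omega]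
      simp [List.replicate_succ]

-- ===== VERDICT (by name: the statement is the Claim_ definition above) =====
theorem content_lines_py_spec : Claim_equal_content_lines_py := by
  intro content _
  unfold Spec_content_lines_py content_lines_py content_lines_py_alt
  cases hs : (PySem.Chars.splitOn content.toList "\n".toList).map String.ofList with
  | nil => rfl
  | cons line0 rest =>
    by_cases h : PySem.Str.strip line0 = "---"
    · simp only [pvGoA, h, and_true, if_pos (rfl : (0:Nat) = 0)]
      rw [show (0 : Nat) + 1 = 0 + 1 from rfl, pvGoA_front]
      rw [show 1 + pvFmLen rest = pvFmLen rest + 1 by omega]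
      simp [List.replicate_succ]
    · simp only [pvGoA, h, and_false, if_false]
      simp only [pvGoB]
      split_ifs <;> simp_all [pvGoA_eq_goB rest 0]
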